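-- pv_equiv track=rewrite | github.com/DobbyIsSlave/Genshin-Mods | namespace_merge.py | comment_fix
-- ===== SOURCE A (Python) =====
-- def comment_fix(block):
--     index = len(block) - 1
--     # cycle from the bottom
--     for line in reversed(block):
--         # If text that is not ; "" [ are found end if is placed there
--         if not line.strip().startswith(';') and not line.strip().startswith('[') and not line.strip() == "":
--             block[index] = block[index]+"endif\n\n"
--             break
--         # removes any indentation given to comments as a result of the previous function
--         elif line.strip().startswith(';'):
--             block[index] = block[index].strip()
--         index -= 1
--     line = ""
--     for x in block:
--         line = line + x
--     block = []
--     return line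
-- ===== SOURCE B (Python) =====
-- def comment_fix(block):
--     # find the last "content" line (non-blank, not a comment ';', not a section '[')
--     content_idx = None
--     for i, s0 in reversed(list(enumerate(block))):
--         s = s0.strip()
--         if s and not s.startswith(';') and not s.startswith('['):
--             content_idx = i
--             break
--     # strip indentation from comment lines after the last content line
--     start = 0 if content_idx is None else content_idx + 1
--     for i, s0 in enumerate(block):
--         if i >= start and s0.strip().startswith(';'):
--             block[i] = s0.strip()
--     if content_idx is not None:
--         block[content_idx] += "endif\n\n"
--     return "".join(block)
-- ===== Notes on version B (the rewrite author's own statement) =====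
-- stated objective: simpler
-- what changed: A's single bottom-up loop that mutates as it scans is decomposed into three plain steps: find the index of the last content line, strip the comment lines after it in a forward pass, then append 'endif' once.
import Mathlib
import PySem

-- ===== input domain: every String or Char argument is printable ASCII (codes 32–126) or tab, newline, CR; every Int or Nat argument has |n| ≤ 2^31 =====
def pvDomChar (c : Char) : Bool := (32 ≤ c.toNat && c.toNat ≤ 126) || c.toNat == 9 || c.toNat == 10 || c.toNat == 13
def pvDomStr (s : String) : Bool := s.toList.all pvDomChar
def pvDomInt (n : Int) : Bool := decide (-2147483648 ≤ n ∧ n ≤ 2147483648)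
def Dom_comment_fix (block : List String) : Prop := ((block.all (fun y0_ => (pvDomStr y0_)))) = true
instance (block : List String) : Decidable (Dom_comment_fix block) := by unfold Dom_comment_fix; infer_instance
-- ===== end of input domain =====

-- B replaces A's single bottom-up mutate-as-you-go loop by a different decomposition:
-- first find the last content line's index, then a forward pass stripping the trailing
-- comment lines, then one append of "endif\n\n"; objective: simpler. Both A and B mutate
-- the caller's list the same way; the equivalence proved here is about the return value.


-- ===== PORT A =====
-- A iterates 'for line in reversed(block)' with a decreasing index, mutating block[index];
-- each mutation happens after that slot is read, so the loop is structural recursion on the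
-- reversed list, producing the reversed mutated list.
def pvALoop : List String → List String
  | [] => []
  | line :: rest =>
    if !(PySem.Str.startswith (PySem.Str.strip line) ";")
        && !(PySem.Str.startswith (PySem.Str.strip line) "[")
        && !(PySem.Str.strip line == "") then
      (line ++ "endif\n\n") :: rest          -- break: the untouched earlier lines stay
    else if PySem.Str.startswith (PySem.Str.strip line) ";" then
      PySem.Str.strip line :: pvALoop rest
    else
      line :: pvALoop rest

def comment_fix (block : List String) : String :=
  ((pvALoop block.reverse).reverse).foldl (fun line x => line ++ x) ""

-- ===== PORT B =====
-- first loop of Source B: 'for i, s0 in reversed(list(enumerate(block)))' with break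
def pvBFind : List (Int × String) → Option Int
  | [] => none
  | (i, s0) :: rest =>
    let s := PySem.Str.strip s0
    if !(s == "") && !(PySem.Str.startswith s ";") && !(PySem.Str.startswith s "[") then
      some i
    else
      pvBFind rest

def comment_fix_alt (block : List String) : String :=
  let ci := pvBFind (PySem.List.enumerate block).reverse
  let start : Int := match ci with | none => 0 | some i => i + 1
  -- second loop: forward pass over enumerate, reassigning the comment lines at index ≥ start
  let blk2 := (PySem.List.enumerate block).map
    (fun p => if decide (start ≤ p.1) && PySem.Str.startswith (PySem.Str.strip p.2) ";"
              then PySem.Str.strip p.2 else p.2)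
  -- block[content_idx] += "endif\n\n"  (content_idx is ≥ 0 by construction, so .toNat is exact)
  let blk3 := match ci with
    | none => blk2
    | some i => blk2.set i.toNat (blk2.getD i.toNat "" ++ "endif\n\n")
  PySem.Str.join "" blk3

-- ===== PRECONDITION & SPEC =====
def Spec_comment_fix (block : List String) (out : String) : Prop := out = comment_fix_alt block
instance (block : List String) (out : String) : Decidable (Spec_comment_fix block out) := by unfold Spec_comment_fix; infer_instance

-- ===== CLAIM (what is proved, stated in full; the proofs are below) =====
def Claim_equal_comment_fix : Prop := ∀ (block : List String), Dom_comment_fix block → Spec_comment_fix block (comment_fix block)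

-- ===== LEMMAS AND PROOFS =====

-- B's list pipeline, factored for the proof (definitionally what comment_fix_alt joins)
def pvListB (block : List String) : List String :=
  let ci := pvBFind (PySem.List.enumerate block).reverse
  let start : Int := match ci with | none => 0 | some i => i + 1
  let blk2 := (PySem.List.enumerate block).map
    (fun p => if decide (start ≤ p.1) && PySem.Str.startswith (PySem.Str.strip p.2) ";"
              then PySem.Str.strip p.2 else p.2)
  match ci with
  | none => blk2
  | some i => blk2.set i.toNat (blk2.getD i.toNat "" ++ "endif\n\n")

theorem comment_fix_alt_eq (block : List String) :
    comment_fix_alt block = PySem.Str.join "" (pvListB block) := rfl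

theorem pvBFind_mem {xs : List (Int × String)} {i : Int} (h : pvBFind xs = some i) :
    ∃ s, (i, s) ∈ xs := by
  induction xs with
  | nil => simp [pvBFind] at h
  | cons p rest ih =>
    obtain ⟨j, s0⟩ := p
    simp only [pvBFind] at h
    split at h
    · injection h with h'
      subst h'
      exact ⟨s0, List.mem_cons_self ..⟩
    · obtain ⟨s, hs⟩ := ih h
      exact ⟨s, List.mem_cons_of_mem _ hs⟩

theorem pvListB_concat (ys : List String) (l : String) :
    pvListB (ys ++ [l]) =
      if !(PySem.Str.strip l == "") && !(PySem.Str.startswith (PySem.Str.strip l) ";")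
          && !(PySem.Str.startswith (PySem.Str.strip l) "[")
      then ys ++ [l ++ "endif\n\n"]
      else pvListB ys ++ [if PySem.Str.startswith (PySem.Str.strip l) ";" then PySem.Str.strip l else l] := by
  have henum : PySem.List.enumerate (ys ++ [l]) 0
      = PySem.List.enumerate ys 0 ++ [((ys.length : Int), l)] := by
    rw [PySem.List.enumerate_append]
    simp [PySem.List.enumerate_cons, PySem.List.enumerate_nil]
  have hidx : ∀ p ∈ PySem.List.enumerate ys 0, (0:Int) ≤ p.1 ∧ p.1 < ys.length := by
    intro p hp
    rw [PySem.List.mem_enumerate_iff] at hp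
    obtain ⟨k, hk, rfl⟩ := hp
    constructor <;> simp <;> omega
  by_cases hc : (!(PySem.Str.strip l == "") && !(PySem.Str.startswith (PySem.Str.strip l) ";")
      && !(PySem.Str.startswith (PySem.Str.strip l) "[")) = true
  · -- content line at the end: find breaks at index ys.length
    rw [if_pos hc]
    simp only [pvListB]
    rw [henum, List.reverse_append]
    simp only [List.reverse_singleton, List.singleton_append, pvBFind]
    rw [if_pos (by simpa using hc)]
    simp only []
    have hmap : (PySem.List.enumerate ys 0 ++ [((ys.length : Int), l)]).map
        (fun p => if decide ((ys.length : Int) + 1 ≤ p.1) && PySem.Str.startswith (PySem.Str.strip p.2) ";"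
              then PySem.Str.strip p.2 else p.2) = ys ++ [l] := by
      rw [List.map_append]
      congr 1
      · have hm : (PySem.List.enumerate ys 0).map
            (fun p => if decide ((ys.length : Int) + 1 ≤ p.1) && PySem.Str.startswith (PySem.Str.strip p.2) ";"
              then PySem.Str.strip p.2 else p.2) = (PySem.List.enumerate ys 0).map (fun p => p.2) := by
          apply List.map_congr_left
          intro p hp
          have := (hidx p hp).2
          rw [if_neg]
          simp only [Bool.and_eq_true, decide_eq_true_eq, not_and]
          intro h1
          omega
        rw [hm, PySem.List.map_snd_enumerate]
      · simp only [List.map_singleton]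
        rw [if_neg]
        simp only [Bool.and_eq_true, decide_eq_true_eq, not_and]
        intro h1
        omega
    rw [hmap]
    have hlen : ((ys.length : Int)).toNat = ys.length := by omega
    rw [hlen]
    have hgetD : (ys ++ [l]).getD ys.length "" = l := by
      simp [List.getD]
    rw [hgetD, List.set_append]
    simp
  · -- no content at the end: find recurses into ys, last line stripped iff comment
    rw [if_neg hc]
    simp only [pvListB]
    rw [henum, List.reverse_append]
    simp only [List.reverse_singleton, List.singleton_append, pvBFind]
    rw [if_neg (by simpa using hc)]
    cases hcc : pvBFind (PySem.List.enumerate ys 0).reverse with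
    | none =>
      dsimp only
      simp only [List.map_append, List.map_singleton]
      congr 2
    | some i =>
      dsimp only
      simp only [List.map_append, List.map_singleton]
      have h0 : (0:Int) ≤ i ∧ i < (ys.length : Int) := by
        obtain ⟨s, hs⟩ := pvBFind_mem hcc
        rw [List.mem_reverse] at hs
        exact hidx _ hs
      have hlast : (if decide (i + 1 ≤ ((ys.length : Int))) && PySem.Str.startswith (PySem.Str.strip l) ";"
              then PySem.Str.strip l else l)
          = if PySem.Str.startswith (PySem.Str.strip l) ";" then PySem.Str.strip l else l := by
        have : decide (i + 1 ≤ (ys.length : Int)) = true := by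
          simp only [decide_eq_true_eq]; omega
        rw [this, Bool.true_and]
      rw [hlast]
      have hlen2 : i.toNat < ((PySem.List.enumerate ys 0).map
          (fun p => if decide (i + 1 ≤ p.1) && PySem.Str.startswith (PySem.Str.strip p.2) ";"
              then PySem.Str.strip p.2 else p.2)).length := by
        rw [List.length_map, PySem.List.length_enumerate]; omega
      rw [List.set_append, if_pos hlen2]
      congr 2
      rw [List.getD_eq_getElem?_getD, List.getD_eq_getElem?_getD,
        List.getElem?_append_left hlen2]

theorem pvListB_eq_pvALoop (r : List String) :
    pvListB r.reverse = (pvALoop r).reverse := by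
  induction r with
  | nil => rfl
  | cons l t ih =>
    rw [List.reverse_cons, pvListB_concat, pvALoop]
    cases hse : PySem.Str.startswith (PySem.Str.strip l) ";" <;>
    cases hbr : PySem.Str.startswith (PySem.Str.strip l) "[" <;>
    cases hem : (PySem.Str.strip l == "") <;>
      simp [hse, hbr, hem, ih, List.reverse_cons]

theorem chars_join_nil_eq_flatten (L : List (List Char)) :
    PySem.Chars.join [] L = L.flatten := by
  induction L with
  | nil => simp [PySem.Chars.join_nil]
  | cons a t ih =>
    cases t with
    | nil => simp [PySem.Chars.join_singleton]
    | cons b t' =>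
      rw [PySem.Chars.join_cons_cons, ih]
      simp

theorem foldl_toList (xs : List String) (acc : String) :
    (xs.foldl (fun line x => line ++ x) acc).toList
      = acc.toList ++ (xs.map String.toList).flatten := by
  induction xs generalizing acc with
  | nil => simp
  | cons a t ih =>
    simp only [List.foldl_cons, ih, String.toList_append, List.map_cons, List.flatten_cons,
      List.append_assoc]

theorem foldl_append_eq_join (xs : List String) :
    xs.foldl (fun line x => line ++ x) "" = PySem.Str.join "" xs := by
  apply String.toList_inj.mp
  rw [foldl_toList, PySem.Str.toList_join, show ("" : String).toList = ([] : List Char) from rfl,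
    chars_join_nil_eq_flatten]
  simp

-- ===== VERDICT (by name: the statement is the Claim_ definition above) =====
theorem comment_fix_spec : Claim_equal_comment_fix := by
  intro block _
  show _ = _
  rw [comment_fix, comment_fix_alt_eq, foldl_append_eq_join,
    ← List.reverse_reverse block, pvListB_eq_pvALoop, List.reverse_reverse]
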